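-- pv_equiv track=rewrite | github.com/pedrobiqua/Aloca-o-de-memoria | matrizPronta.py | organiza_Matrix
-- ===== SOURCE A (Python) =====
-- vazio = "_"
--
-- Alocado = "X"
--
-- tempo = "T"
--
-- tempo_vazio = "E"
--
-- def organiza_Matrix(m, x, y):
--     # Organiza a matriz, colocando ou retirando os X.
--     spaces = 0
--     for i in range(y):
--         for j in range(x):
--             # Substitui os "E" por "_"
--             if m[i][j] == tempo_vazio:
--                 m[i][j] = vazio
--                 spaces+=1
--
--             # Substitui os "T" por "X"
--             elif m[i][j] == tempo:
--                 m[i][j] = Alocado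
--
--             # Conta o numero de espaços e retorna pela função
--             elif m[i][j] == vazio:
--                 spaces+=1
--     return spaces
-- ===== SOURCE B (Python) =====
-- vazio = "_"
--
-- Alocado = "X"
--
-- tempo = "T"
--
-- tempo_vazio = "E"
--
-- def organiza_Matrix(m, x, y):
--     # Empty window: nothing to organise, no empty cells in it.
--     if x <= 0 or y <= 0:
--         return 0
--     # Pass 1: organise the matrix in place (E -> _, T -> X), no counting.
--     for i in range(y):
--         for j in range(x):
--             if m[i][j] == tempo_vazio:
--                 m[i][j] = vazio
--             elif m[i][j] == tempo:
--                 m[i][j] = Alocado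
--     # Pass 2: count the empty cells of the organised window.
--     return sum(m[i][:x].count(vazio) for i in range(y))
-- ===== Notes on version B (the rewrite author's own statement) =====
-- stated objective: alternative
-- what changed: A counts empty cells while replacing in one fused nested loop; B first replaces E->_/T->X in place without counting, then counts '_' in the organised window with a separate slice-and-count pass per row (plus an early return 0 for an empty window).
import Mathlib
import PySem

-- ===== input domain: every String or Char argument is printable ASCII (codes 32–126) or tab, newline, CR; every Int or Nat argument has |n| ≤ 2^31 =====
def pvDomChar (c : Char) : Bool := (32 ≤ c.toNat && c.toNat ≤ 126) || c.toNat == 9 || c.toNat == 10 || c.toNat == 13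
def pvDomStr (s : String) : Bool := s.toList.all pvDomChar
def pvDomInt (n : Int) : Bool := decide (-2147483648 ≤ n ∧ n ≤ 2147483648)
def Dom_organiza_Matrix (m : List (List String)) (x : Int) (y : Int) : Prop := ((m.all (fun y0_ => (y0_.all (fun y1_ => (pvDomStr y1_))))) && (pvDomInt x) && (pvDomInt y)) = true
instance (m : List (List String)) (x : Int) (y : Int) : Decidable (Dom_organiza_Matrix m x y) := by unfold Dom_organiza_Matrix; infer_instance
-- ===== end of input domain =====

-- B replaces E->_/T->X first and counts '_' in a separate slice-and-count pass (return value only: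
-- both Pythons organise the matrix in place identically; the ports model the returned count).

-- ===== PORT A =====
def organiza_Matrix (m : List (List String)) (x : Int) (y : Int) : Int :=
  ((PySem.List.pyRange 0 y 1).foldl (fun st i =>
    (PySem.List.pyRange 0 x 1).foldl (fun st2 j =>
      let row := PySem.List.pyGetD st2.1 i []
      let c := PySem.List.pyGetD row j ""
      if c = "E" then (PySem.List.pySetD st2.1 i (PySem.List.pySetD row j "_"), st2.2 + 1)
      else if c = "T" then (PySem.List.pySetD st2.1 i (PySem.List.pySetD row j "X"), st2.2)
      else if c = "_" then (st2.1, st2.2 + 1)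
      else st2) st) ((m, (0 : Int)) : List (List String) × Int)).2

-- ===== PORT B =====
def organiza_Matrix_alt (m : List (List String)) (x : Int) (y : Int) : Int :=
  if x ≤ 0 ∨ y ≤ 0 then 0
  else
    let m2 := (PySem.List.pyRange 0 y 1).foldl (fun mm i =>
      (PySem.List.pyRange 0 x 1).foldl (fun mm2 j =>
        let row := PySem.List.pyGetD mm2 i []
        let c := PySem.List.pyGetD row j ""
        if c = "E" then PySem.List.pySetD mm2 i (PySem.List.pySetD row j "_")
        else if c = "T" then PySem.List.pySetD mm2 i (PySem.List.pySetD row j "X")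
        else mm2) mm) m
    ((PySem.List.pyRange 0 y 1).map (fun i =>
      ((PySem.List.count (PySem.List.slice (PySem.List.pyGetD m2 i []) none (some x)) "_" : Nat) : Int))).sum

-- ===== PRECONDITION & SPEC =====
-- Pre_ excludes exactly the inputs where A raises IndexError: a positive window (x > 0, y > 0)
-- reaching past the rows of m or past the cells of one of the first y rows.
def Pre_organiza_Matrix (m : List (List String)) (x : Int) (y : Int) : Prop :=
  x ≤ 0 ∨ y ≤ 0 ∨ (y.toNat ≤ m.length ∧ ∀ row ∈ m.take y.toNat, x.toNat ≤ row.length)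
instance (m : List (List String)) (x : Int) (y : Int) : Decidable (Pre_organiza_Matrix m x y) := by unfold Pre_organiza_Matrix; infer_instance
def pvWitness_organiza_Matrix : List (List String) × Int × Int := ([["E", "T"], ["_", "a"]], 2, 2)

def Spec_organiza_Matrix (m : List (List String)) (x : Int) (y : Int) (out : Int) : Prop := out = organiza_Matrix_alt m x y
instance (m : List (List String)) (x : Int) (y : Int) (out : Int) : Decidable (Spec_organiza_Matrix m x y out) := by unfold Spec_organiza_Matrix; infer_instance

-- ===== CLAIM (what is proved, stated in full; the proofs are below) =====
def Claim_equal_organiza_Matrix : Prop := ∀ (m : List (List String)) (x : Int) (y : Int), Dom_organiza_Matrix m x y → Pre_organiza_Matrix m x y → Spec_organiza_Matrix m x y (organiza_Matrix m x y)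

-- ===== LEMMAS AND PROOFS =====

-- the cell transform (what pass 1 does to one cell) and the counting predicate
def pvF (c : String) : String := if c = "E" then "_" else if c = "T" then "X" else c
def pvP (c : String) : Bool := c = "E" || c = "_"
-- the first n cells of row transformed
def pvG (n : Nat) (row : List String) : List String := (row.take n).map pvF ++ row.drop n
-- the first k rows of m transformed on their first n cells
def pvGmat (n k : Nat) (m : List (List String)) : List (List String) := (m.take k).map (pvG n) ++ m.drop k

theorem pvF_of_ne {c : String} (h1 : c ≠ "E") (h2 : c ≠ "T") : pvF c = c := by
  simp [pvF, h1, h2]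

theorem pv_mapTake_getElem {α : Type} (F : α → α) (l : List α) (k : Nat) (hk : k < l.length) :
    ((l.take k).map F ++ l.drop k)[k]'(by simp [Nat.min_eq_left (Nat.le_of_lt hk)]; omega) = l[k] := by
  have h1 : ((l.take k).map F).length = k := by
    simp [Nat.min_eq_left (Nat.le_of_lt hk)]
  rw [List.getElem_append_right (by omega)]
  simp
  congr 1
  omega

theorem pv_mapTake_getD {α : Type} (F : α → α) (l : List α) (k : Nat) (hk : k < l.length) (d : α) :
    ((l.take k).map F ++ l.drop k).getD k d = l[k] := by
  rw [List.getD_eq_getElem _ _ (by simp [Nat.min_eq_left (Nat.le_of_lt hk)]; omega)]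
  exact pv_mapTake_getElem F l k hk

theorem pv_mapTake_succ {α : Type} (F : α → α) (l : List α) (k : Nat) (hk : k < l.length) :
    (l.take (k+1)).map F ++ l.drop (k+1) = (l.take k).map F ++ F l[k] :: l.drop (k+1) := by
  rw [List.take_add_one, List.getElem?_eq_getElem hk]
  simp only [Option.toList_some, List.map_append, List.map_cons, List.map_nil,
    List.append_assoc, List.cons_append, List.nil_append]

theorem pv_mapTake_set {α : Type} (F : α → α) (l : List α) (k : Nat) (hk : k < l.length) (v : α) :
    ((l.take k).map F ++ l.drop k).set k v = (l.take k).map F ++ v :: l.drop (k+1) := by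
  have h1 : ((l.take k).map F).length = k := by
    simp [Nat.min_eq_left (Nat.le_of_lt hk)]
  rw [List.set_append_right _ _ (by omega), h1,
    show k - k = 0 by omega, List.drop_eq_getElem_cons hk, List.set_cons_zero]

theorem pv_mapTake_step {α : Type} (F : α → α) (l : List α) (k : Nat) (hk : k < l.length) :
    ((l.take k).map F ++ l.drop k).set k (F l[k]) = (l.take (k+1)).map F ++ l.drop (k+1) := by
  rw [pv_mapTake_set F l k hk, pv_mapTake_succ F l k hk]

theorem pvG_succ (row : List String) (n : Nat) (hn : n < row.length) :
    pvG (n+1) row = (pvG n row).set n (pvF row[n]) := by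
  unfold pvG
  rw [pv_mapTake_step pvF row n hn]

theorem pvG_getD (row : List String) (n : Nat) (hn : n < row.length) :
    (pvG n row).getD n "" = row[n] := pv_mapTake_getD pvF row n hn ""

theorem pvG_set_self (row : List String) (n : Nat) (hn : n < row.length) :
    (pvG n row).set n row[n] = pvG n row := by
  have : (pvG n row)[n]'(by unfold pvG; simp [Nat.min_eq_left (Nat.le_of_lt hn)]; omega) = row[n] :=
    pv_mapTake_getElem pvF row n hn
  rw [← this, List.set_getElem_self]

theorem pvGmat_length (n k : Nat) (m : List (List String)) : (pvGmat n k m).length = m.length := by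
  unfold pvGmat; simp; omega

theorem pv_mem_take (m : List (List String)) (k h : Nat) (hk : k < h) (hh : h ≤ m.length) :
    m[k]'(by omega) ∈ m.take h := by
  have hkt : k < (m.take h).length := by simp [Nat.min_eq_left hh]; omega
  have hmem := List.getElem_mem hkt
  simpa using hmem

theorem pvGmat_getD (n h k : Nat) (m : List (List String)) (hk : k < h) (hh : h ≤ m.length) :
    (pvGmat n h m).getD k [] = pvG n (m[k]'(by omega)) := by
  rw [List.getD_eq_getElem _ _ (by rw [pvGmat_length]; omega)]
  unfold pvGmat
  have hlt : k < ((m.take h).map (pvG n)).length := by simp [Nat.min_eq_left hh]; omega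
  rw [List.getElem_append_left hlt]
  simp

theorem pv_foldl_const (l : List Int) (st : List (List String) × Int) :
    l.foldl (fun st _ => st) st = st := by
  induction l generalizing st with
  | nil => rfl
  | cons a l ih => exact ih st

-- pass-1 inner loop of B over one row (j = 0 .. n-1)
theorem pvB_inner (n : Nat) (mm : List (List String)) (i : Nat) (hi : i < mm.length)
    (hn : n ≤ (mm[i]).length) :
    (PySem.List.pyRange 0 (n : Int) 1).foldl (fun mm2 j =>
        let row := PySem.List.pyGetD mm2 (i : Int) []
        let c := PySem.List.pyGetD row j ""
        if c = "E" then PySem.List.pySetD mm2 (i : Int) (PySem.List.pySetD row j "_")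
        else if c = "T" then PySem.List.pySetD mm2 (i : Int) (PySem.List.pySetD row j "X")
        else mm2) mm
    = mm.set i (pvG n mm[i]) := by
  induction n with
  | zero =>
      rw [Nat.cast_zero, PySem.List.pyRange_one_eq_nil le_rfl]
      simp only [List.foldl_nil]
      rw [show pvG 0 mm[i] = mm[i] by simp [pvG], List.set_getElem_self]
  | succ n ih =>
      have hlt : n < (mm[i]).length := by omega
      rw [show (((n+1 : Nat)) : Int) = (n : Int) + 1 by push_cast; ring,
          PySem.List.pyRange_one_succ_right (Int.natCast_nonneg n), List.foldl_append,
          ih (by omega)]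
      simp only [List.foldl_cons, List.foldl_nil]
      have hilen : i < (mm.set i (pvG n mm[i])).length := by simpa using hi
      have hrow : PySem.List.pyGetD (mm.set i (pvG n mm[i])) (i : Int) [] = pvG n mm[i] := by
        rw [PySem.List.pyGetD_natCast, List.getD_eq_getElem _ _ hilen, List.getElem_set_self]
      have hc : PySem.List.pyGetD (pvG n mm[i]) (n : Int) "" = mm[i][n] := by
        rw [PySem.List.pyGetD_natCast]; exact pvG_getD _ _ hlt
      simp only [hrow, hc, PySem.List.pySetD_natCast, List.set_set]
      by_cases hE : mm[i][n] = "E"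
      · rw [if_pos hE, pvG_succ _ _ hlt, show pvF mm[i][n] = "_" by simp [pvF, hE]]
      · rw [if_neg hE]
        by_cases hT : mm[i][n] = "T"
        · rw [if_pos hT, pvG_succ _ _ hlt, show pvF mm[i][n] = "X" by simp [pvF, hT]]
        · rw [if_neg hT, pvG_succ _ _ hlt, pvF_of_ne hE hT, pvG_set_self _ _ hlt]

theorem pv_countP_take_succ (row : List String) (n : Nat) (hlt : n < row.length) :
    (row.take (n+1)).countP pvP = (row.take n).countP pvP + (if pvP row[n] then 1 else 0) := by
  rw [List.take_add_one, List.getElem?_eq_getElem hlt, List.countP_append]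
  simp [List.countP_cons]

-- fused inner loop of A over one row (j = 0 .. n-1)
theorem pvA_inner (n : Nat) (mm : List (List String)) (s : Int) (i : Nat) (hi : i < mm.length)
    (hn : n ≤ (mm[i]).length) :
    (PySem.List.pyRange 0 (n : Int) 1).foldl (fun st2 j =>
        let row := PySem.List.pyGetD st2.1 (i : Int) []
        let c := PySem.List.pyGetD row j ""
        if c = "E" then (PySem.List.pySetD st2.1 (i : Int) (PySem.List.pySetD row j "_"), st2.2 + 1)
        else if c = "T" then (PySem.List.pySetD st2.1 (i : Int) (PySem.List.pySetD row j "X"), st2.2)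
        else if c = "_" then (st2.1, st2.2 + 1)
        else st2) ((mm, s) : List (List String) × Int)
    = (mm.set i (pvG n mm[i]), s + (((mm[i]).take n).countP pvP : Int)) := by
  induction n with
  | zero =>
      rw [Nat.cast_zero, PySem.List.pyRange_one_eq_nil le_rfl]
      simp only [List.foldl_nil, List.take_zero, List.countP_nil]
      rw [show pvG 0 mm[i] = mm[i] by simp [pvG], List.set_getElem_self]
      simp
  | succ n ih =>
      have hlt : n < (mm[i]).length := by omega
      rw [show (((n+1 : Nat)) : Int) = (n : Int) + 1 by push_cast; ring,
          PySem.List.pyRange_one_succ_right (Int.natCast_nonneg n), List.foldl_append,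
          ih (by omega)]
      simp only [List.foldl_cons, List.foldl_nil]
      have hilen : i < (mm.set i (pvG n mm[i])).length := by simpa using hi
      have hrow : PySem.List.pyGetD (mm.set i (pvG n mm[i])) (i : Int) [] = pvG n mm[i] := by
        rw [PySem.List.pyGetD_natCast, List.getD_eq_getElem _ _ hilen, List.getElem_set_self]
      have hc : PySem.List.pyGetD (pvG n mm[i]) (n : Int) "" = mm[i][n] := by
        rw [PySem.List.pyGetD_natCast]; exact pvG_getD _ _ hlt
      simp only [hrow, hc, PySem.List.pySetD_natCast, List.set_set]
      rw [pv_countP_take_succ _ _ hlt]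
      by_cases hE : mm[i][n] = "E"
      · rw [if_pos hE, show pvP mm[i][n] = true by simp [pvP, hE]]
        simp only [Prod.mk.injEq]
        refine ⟨?_, by push_cast; ring⟩
        rw [pvG_succ _ _ hlt, show pvF mm[i][n] = "_" by simp [pvF, hE]]
      · rw [if_neg hE]
        by_cases hT : mm[i][n] = "T"
        · rw [if_pos hT, show pvP mm[i][n] = false by simp [pvP, hT]]
          simp only [Prod.mk.injEq]
          refine ⟨?_, by push_cast; ring⟩
          rw [pvG_succ _ _ hlt, show pvF mm[i][n] = "X" by simp [pvF, hT]]
        · rw [if_neg hT]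
          by_cases hU : mm[i][n] = "_"
          · rw [if_pos hU, show pvP mm[i][n] = true by simp [pvP, hU]]
            simp only [Prod.mk.injEq]
            refine ⟨?_, by push_cast; ring⟩
            rw [pvG_succ _ _ hlt, pvF_of_ne hE hT, pvG_set_self _ _ hlt]
          · rw [if_neg hU, show pvP mm[i][n] = false by simp [pvP, hE, hU]]
            simp only [Prod.mk.injEq]
            refine ⟨?_, by push_cast; ring⟩
            rw [pvG_succ _ _ hlt, pvF_of_ne hE hT, pvG_set_self _ _ hlt]

-- pass-1 outer loop of B (i = 0 .. k-1)
theorem pvB_outer (x : Int) (hx : 0 ≤ x) (k : Nat) (m : List (List String)) :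
    k ≤ m.length → (∀ row ∈ m.take k, x.toNat ≤ row.length) →
    (PySem.List.pyRange 0 (k : Int) 1).foldl (fun mm i =>
      (PySem.List.pyRange 0 x 1).foldl (fun mm2 j =>
        let row := PySem.List.pyGetD mm2 i []
        let c := PySem.List.pyGetD row j ""
        if c = "E" then PySem.List.pySetD mm2 i (PySem.List.pySetD row j "_")
        else if c = "T" then PySem.List.pySetD mm2 i (PySem.List.pySetD row j "X")
        else mm2) mm) m
    = pvGmat x.toNat k m := by
  induction k with
  | zero =>
      intro _ _
      rw [Nat.cast_zero, PySem.List.pyRange_one_eq_nil le_rfl]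
      simp [pvGmat]
  | succ k ih =>
      intro hk hrows
      have hsub : m.take k ⊆ m.take (k+1) := by
        intro a ha
        have h2 : m.take k = (m.take (k+1)).take k := by
          rw [List.take_take]; congr 1; omega
        rw [h2] at ha
        exact List.take_subset _ _ ha
      rw [show (((k+1 : Nat)) : Int) = (k : Int) + 1 by push_cast; ring,
          PySem.List.pyRange_one_succ_right (Int.natCast_nonneg k), List.foldl_append,
          ih (by omega) (fun row hr => hrows row (hsub hr))]
      simp only [List.foldl_cons, List.foldl_nil]
      have hmk : k < m.length := by omega
      have hklen : k < (pvGmat x.toNat k m).length := by rw [pvGmat_length]; omega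
      have hgk : (pvGmat x.toNat k m)[k]'hklen = m[k] := pv_mapTake_getElem (pvG x.toNat) m k hmk
      have hmem : m[k] ∈ m.take (k+1) := pv_mem_take m k (k+1) (by omega) hk
      have hcast : PySem.List.pyRange 0 x 1 = PySem.List.pyRange 0 ((x.toNat : Nat) : Int) 1 := by
        rw [Int.toNat_of_nonneg hx]
      rw [hcast, pvB_inner x.toNat (pvGmat x.toNat k m) k hklen
            (by rw [hgk]; exact hrows _ hmem)]
      simp only [hgk]
      exact pv_mapTake_step (pvG x.toNat) m k hmk

-- fused outer loop of A (i = 0 .. k-1)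
theorem pvA_outer (x : Int) (hx : 0 ≤ x) (k : Nat) (m : List (List String)) :
    k ≤ m.length → (∀ row ∈ m.take k, x.toNat ≤ row.length) →
    (PySem.List.pyRange 0 (k : Int) 1).foldl (fun st i =>
      (PySem.List.pyRange 0 x 1).foldl (fun st2 j =>
        let row := PySem.List.pyGetD st2.1 i []
        let c := PySem.List.pyGetD row j ""
        if c = "E" then (PySem.List.pySetD st2.1 i (PySem.List.pySetD row j "_"), st2.2 + 1)
        else if c = "T" then (PySem.List.pySetD st2.1 i (PySem.List.pySetD row j "X"), st2.2)
        else if c = "_" then (st2.1, st2.2 + 1)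
        else st2) st) ((m, (0 : Int)) : List (List String) × Int)
    = (pvGmat x.toNat k m,
       ((m.take k).map (fun row => (((row.take x.toNat).countP pvP : Nat) : Int))).sum) := by
  induction k with
  | zero =>
      intro _ _
      rw [Nat.cast_zero, PySem.List.pyRange_one_eq_nil le_rfl]
      simp [pvGmat]
  | succ k ih =>
      intro hk hrows
      have hsub : m.take k ⊆ m.take (k+1) := by
        intro a ha
        have h2 : m.take k = (m.take (k+1)).take k := by
          rw [List.take_take]; congr 1; omega
        rw [h2] at ha
        exact List.take_subset _ _ ha
      rw [show (((k+1 : Nat)) : Int) = (k : Int) + 1 by push_cast; ring,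
          PySem.List.pyRange_one_succ_right (Int.natCast_nonneg k), List.foldl_append,
          ih (by omega) (fun row hr => hrows row (hsub hr))]
      simp only [List.foldl_cons, List.foldl_nil]
      have hmk : k < m.length := by omega
      have hklen : k < (pvGmat x.toNat k m).length := by rw [pvGmat_length]; omega
      have hgk : (pvGmat x.toNat k m)[k]'hklen = m[k] := pv_mapTake_getElem (pvG x.toNat) m k hmk
      have hmem : m[k] ∈ m.take (k+1) := pv_mem_take m k (k+1) (by omega) hk
      have hcast : PySem.List.pyRange 0 x 1 = PySem.List.pyRange 0 ((x.toNat : Nat) : Int) 1 := by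
        rw [Int.toNat_of_nonneg hx]
      rw [hcast, pvA_inner x.toNat (pvGmat x.toNat k m) _ k hklen
            (by rw [hgk]; exact hrows _ hmem)]
      simp only [hgk, Prod.mk.injEq]
      refine ⟨pv_mapTake_step (pvG x.toNat) m k hmk, ?_⟩
      rw [List.take_add_one, List.getElem?_eq_getElem hmk, List.map_append, List.sum_append]
      simp

-- counting "_" in a transformed prefix is counting E-or-_ cells of the original prefix
theorem pv_count_transformed (row : List String) (n : Nat) (hn : n ≤ row.length) :
    List.count "_" ((pvG n row).take n) = (row.take n).countP pvP := by
  have h1 : (pvG n row).take n = (row.take n).map pvF := by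
    unfold pvG
    exact List.take_left' (by simp [Nat.min_eq_left hn])
  rw [h1]
  generalize row.take n = l
  induction l with
  | nil => simp
  | cons a l ih =>
      by_cases hE : a = "E"
      · simp [ih, pvF, pvP, hE]
      · by_cases hT : a = "T"
        · simp [ih, pvF, pvP, hT]
        · simp [List.count_cons, List.countP_cons, ih, pvF, pvP, hE, hT]

-- sum over indices 0..h-1 of a function of m[k] is the sum over the first h rows
theorem pv_sum_range (h : Nat) (m : List (List String)) (Φ : List String → Int) :
    h ≤ m.length →
    ((List.range h).map (fun k => Φ (m.getD k []))).sum = ((m.take h).map Φ).sum := by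
  induction h with
  | zero => intro _; simp
  | succ h ih =>
      intro hh
      rw [List.range_succ, List.map_append, List.sum_append, ih (by omega),
          List.take_add_one, List.getElem?_eq_getElem (show h < m.length by omega),
          List.map_append, List.sum_append]
      simp [List.getD, List.getElem?_eq_getElem (show h < m.length by omega)]

-- ===== VERDICT (by name: the statement is the Claim_ definition above) =====
theorem organiza_Matrix_spec : Claim_equal_organiza_Matrix := by
  intro m x y _ hpre
  unfold Pre_organiza_Matrix at hpre
  unfold Spec_organiza_Matrix organiza_Matrix organiza_Matrix_alt
  by_cases hxy : x ≤ 0 ∨ y ≤ 0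
  · rw [if_pos hxy]
    rcases hxy with hx | hy
    · rw [PySem.List.pyRange_one_eq_nil hx]
      simp only [List.foldl_nil]
      rw [pv_foldl_const]
    · rw [PySem.List.pyRange_one_eq_nil hy]
      simp only [List.foldl_nil]
  · rw [if_neg hxy]
    push_neg at hxy
    obtain ⟨hx0, hy0⟩ := hxy
    rcases hpre with hx | hy | ⟨hk, hrows⟩
    · omega
    · omega
    · have hycast : ((y.toNat : Nat) : Int) = y := Int.toNat_of_nonneg (by omega)
      rw [← hycast,
          pvA_outer x (by omega) y.toNat m hk hrows,
          pvB_outer x (by omega) y.toNat m hk hrows,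
          PySem.List.pyRange_one 0 ((y.toNat : Nat) : Int)]
      dsimp only
      rw [List.map_map]
      have hlen : (((y.toNat : Nat) : Int) - 0).toNat = y.toNat := by omega
      rw [hlen]
      have hterm : ∀ k ∈ List.range y.toNat,
          ((fun i => ((PySem.List.count (PySem.List.slice
              (PySem.List.pyGetD (pvGmat x.toNat y.toNat m) i []) none (some x)) "_" : Nat) : Int))
            ∘ (fun k : Nat => (0 : Int) + (k : Int))) k
          = (fun row => (((row.take x.toNat).countP pvP : Nat) : Int)) (m.getD k []) := by
        intro k hkmem
        have hky : k < y.toNat := List.mem_range.mp hkmem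
        have hkm : k < m.length := by omega
        simp only [Function.comp_apply, zero_add]
        rw [PySem.List.pyGetD_natCast, pvGmat_getD x.toNat y.toNat k m hky hk,
            PySem.List.slice_to (pvG x.toNat (m[k]'hkm)) (b := x) (by omega),
            PySem.List.count_eq,
            pv_count_transformed (m[k]'hkm) x.toNat
              (hrows _ (pv_mem_take m k y.toNat hky hk)),
            List.getD_eq_getElem _ _ hkm]
      rw [List.map_congr_left hterm]
      exact (pv_sum_range y.toNat m (fun row => (((row.take x.toNat).countP pvP : Nat) : Int)) hk).symm
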